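-- pv_equiv track=rewrite | github.com/GuiJR777/INE5603-01238A-20201---Programa-o-Orientada-a-Objetos-I | strings/tautograma.py | checa_tautograma
-- ===== SOURCE A (Python) =====
-- def checa_primeira_letra(lista):
--     primeira_palavra = list(lista[0])
--     primeira_letra = primeira_palavra[0]
--     return primeira_letra
--
-- def checa_tautograma(frase):
--     frase = frase.lower()
--     tauto = True
--     strings = frase.split(' ')
--     primeira_letra = checa_primeira_letra(strings)
--     for string in strings:
--         if string[0] == primeira_letra:
--             pass
--         else:
--             tauto = False
--     return tauto
-- ===== SOURCE B (Python) =====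
-- def checa_tautograma(frase):
--     palavras = frase.lower().split(' ')
--     return len({palavra[0] for palavra in palavras}) == 1
-- ===== Notes on version B (the rewrite author's own statement) =====
-- stated objective: simpler
-- what changed: B collects the set of distinct first letters of the lowercased words and tests that its cardinality is 1, instead of A's helper extracting a reference letter and a boolean flag loop comparing every word against it.
import Mathlib
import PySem

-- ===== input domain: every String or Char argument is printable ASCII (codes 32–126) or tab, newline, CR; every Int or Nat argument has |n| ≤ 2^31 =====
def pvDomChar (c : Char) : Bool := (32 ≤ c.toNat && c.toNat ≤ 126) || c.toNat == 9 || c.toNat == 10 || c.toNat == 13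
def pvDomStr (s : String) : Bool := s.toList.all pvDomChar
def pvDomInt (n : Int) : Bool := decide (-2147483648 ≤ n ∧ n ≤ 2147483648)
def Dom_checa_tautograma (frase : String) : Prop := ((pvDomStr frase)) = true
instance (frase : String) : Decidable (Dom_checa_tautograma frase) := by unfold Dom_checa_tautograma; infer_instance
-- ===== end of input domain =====

-- B replaces A's reference-letter helper and boolean flag loop by the set of distinct
-- first letters of the lowercased words, answering via its cardinality (objective: simpler).

-- ===== PORT A =====
-- lista[0], then its first character; pyGet? is none exactly where Python raises IndexError
def checa_primeira_letra (lista : List (List Char)) : Option Char :=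
  match PySem.List.pyGet? lista 0 with
  | some primeira_palavra => PySem.List.pyGet? primeira_palavra 0
  | none => none

def checa_tautograma (frase : String) : Bool :=
  let fraseL := PySem.Chars.lower frase.toList
  let strings := PySem.Chars.splitOn fraseL [' ']
  let primeira_letra := checa_primeira_letra strings
  strings.foldl (fun tauto string =>
    if PySem.List.pyGet? string 0 == primeira_letra then tauto else false) true

-- ===== PORT B =====
def checa_tautograma_alt (frase : String) : Bool :=
  let palavras := PySem.Chars.splitOn (PySem.Chars.lower frase.toList) [' ']
  PySem.Set.len (PySem.Set.ofList (palavras.map (fun p => PySem.List.pyGet? p 0))) == 1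

-- ===== PRECONDITION & SPEC =====
-- Pre_ excludes exactly the phrases with an empty space-separated word (empty phrase,
-- leading/trailing/double space), on which both Pythons raise IndexError.
def Pre_checa_tautograma (frase : String) : Prop :=
  ∀ w ∈ PySem.Chars.splitOn frase.toList [' '], w ≠ []
instance (frase : String) : Decidable (Pre_checa_tautograma frase) := by
  unfold Pre_checa_tautograma; infer_instance

def pvWitness_checa_tautograma : String := "Ana ama abacaxi"

def Spec_checa_tautograma (frase : String) (out : Bool) : Prop := out = checa_tautograma_alt frase
instance (frase : String) (out : Bool) : Decidable (Spec_checa_tautograma frase out) := by unfold Spec_checa_tautograma; infer_instance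

-- ===== CLAIM (what is proved, stated in full; the proofs are below) =====
def Claim_equal_checa_tautograma : Prop := ∀ (frase : String), Dom_checa_tautograma frase → Pre_checa_tautograma frase → Spec_checa_tautograma frase (checa_tautograma frase)

-- ===== LEMMAS AND PROOFS =====

theorem lowerChar_space_iff (c : Char) : (PySem.Chars.lowerChar c = ' ') ↔ c = ' ' := by
  unfold PySem.Chars.lowerChar PySem.Chars.isupper
  by_cases h1 : 'A' ≤ c
  · by_cases h2 : c ≤ 'Z'
    · have hA : 65 ≤ c.toNat := by
        rw [Char.le_def] at h1; exact Nat.succ_le_of_lt h1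
      have hZ : c.toNat ≤ 90 := by
        rw [Char.le_def] at h2; exact h2
      have hval : Nat.isValidChar (c.toNat + 32) := Or.inl (by omega)
      have hv : (Char.ofNat (c.toNat + 32)).toNat = c.toNat + 32 := by
        rw [Char.toNat_ofNat, if_pos hval]
      simp only [h1, h2, decide_true, Bool.and_self, if_true]
      constructor
      · intro he
        rw [he] at hv
        exfalso
        have hsp : (' ' : Char).toNat = 32 := by decide
        omega
      · intro he; subst he; exfalso; revert hA; decide
    · simp [h2]
  · simp [h1]

theorem splitOn_go_ne_nil (sep : List Char) :
    ∀ (fuel : Nat) (l cur : List Char) (acc : List (List Char)),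
      PySem.Chars.splitOn.go sep fuel l cur acc ≠ [] := by
  intro fuel
  induction fuel with
  | zero => intro l cur acc; simp [PySem.Chars.splitOn.go]
  | succ fuel ih =>
    intro l cur acc
    cases l with
    | nil => simp [PySem.Chars.splitOn.go]
    | cons c rest =>
      rw [PySem.Chars.splitOn.go]
      split
      · exact ih _ _ _
      · exact ih _ _ _

theorem splitOn_go_lower :
    ∀ (fuel : Nat) (l cur : List Char) (acc : List (List Char)),
      PySem.Chars.splitOn.go [' '] fuel (PySem.Chars.lower l) (PySem.Chars.lower cur) (acc.map PySem.Chars.lower)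
        = (PySem.Chars.splitOn.go [' '] fuel l cur acc).map PySem.Chars.lower := by
  intro fuel
  induction fuel with
  | zero =>
    intro l cur acc
    simp [PySem.Chars.splitOn.go, PySem.Chars.lower]
  | succ fuel ih =>
    intro l cur acc
    cases l with
    | nil => simp [PySem.Chars.splitOn.go, PySem.Chars.lower]
    | cons c rest =>
      have hl : PySem.Chars.lower (c :: rest) = PySem.Chars.lowerChar c :: PySem.Chars.lower rest := by
        simp [PySem.Chars.lower]
      have hcond : (List.isPrefixOf [' '] (PySem.Chars.lowerChar c :: PySem.Chars.lower rest))
          = List.isPrefixOf [' '] (c :: rest) := by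
        simp [List.isPrefixOf]
        constructor
        · intro h; exact ((lowerChar_space_iff c).mp h.symm).symm
        · intro h; rw [← h]; decide
      rw [hl, PySem.Chars.splitOn.go, PySem.Chars.splitOn.go, hcond]
      split
      · have := ih rest [] (cur.reverse :: acc)
        simpa [PySem.Chars.lower, List.map_reverse] using this
      · have := ih rest (c :: cur) acc
        simpa [PySem.Chars.lower] using this

theorem splitOn_lower (l : List Char) :
    PySem.Chars.splitOn (PySem.Chars.lower l) [' ']
      = (PySem.Chars.splitOn l [' ']).map PySem.Chars.lower := by
  unfold PySem.Chars.splitOn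
  have hlen : (PySem.Chars.lower l).length = l.length := by simp [PySem.Chars.lower]
  rw [hlen]
  have := splitOn_go_lower (l.length + 1) l [] []
  simpa [PySem.Chars.lower] using this

theorem foldl_flag {α β : Type} [BEq β] (l : List α) (g : α → β) (a : β) :
    ∀ b : Bool, l.foldl (fun t x => if g x == a then t else false) b
      = (b && l.all (fun x => g x == a)) := by
  induction l with
  | nil => intro b; simp
  | cons x l ih =>
    intro b
    simp only [List.foldl_cons, List.all_cons, ih]
    by_cases h : (g x == a) = true <;> simp [h]

theorem length_le_foldl_add {α : Type} [BEq α] :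
    ∀ (l : List α) (s : PySem.Set α), s.length ≤ (l.foldl PySem.Set.add s).length := by
  intro l
  induction l with
  | nil => intro s; simp
  | cons x l ih =>
    intro s
    calc s.length ≤ (PySem.Set.add s x).length := by
          unfold PySem.Set.add; split <;> simp
      _ ≤ _ := ih _

theorem foldl_add_length_eq {α : Type} [BEq α] :
    ∀ (l : List α) (s : PySem.Set α),
      ((l.foldl PySem.Set.add s).length = s.length) ↔ ∀ x ∈ l, s.contains x := by
  intro l
  induction l with
  | nil => intro s; simp
  | cons x l ih =>
    intro s
    simp only [List.foldl_cons, List.mem_cons]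
    by_cases hc : s.contains x = true
    · have hc' : List.contains s x = true := hc
      have : PySem.Set.add s x = s := by unfold PySem.Set.add; simp [PySem.Set.contains, hc']
      rw [this, ih]
      constructor
      · intro h y hy
        rcases hy with rfl | hy
        · exact hc
        · exact h y hy
      · intro h y hy; exact h y (Or.inr hy)
    · have hc' : ¬ List.contains s x = true := hc
      have hadd : PySem.Set.add s x = s ++ [x] := by unfold PySem.Set.add; simp [PySem.Set.contains, hc']
      constructor
      · intro h
        exfalso
        have hle := length_le_foldl_add l (PySem.Set.add s x)
        rw [hadd] at hle h
        simp at hle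
        omega
      · intro h
        exact absurd (h x (Or.inl rfl)) hc

theorem pyGet?_cons_zero {α : Type} (x : α) (l : List α) : PySem.List.pyGet? (x :: l) 0 = some x := by
  simp [pysem]

-- ===== VERDICT (by name: the statement is the Claim_ definition above) =====
theorem checa_tautograma_spec : Claim_equal_checa_tautograma := by
  intro frase _hDom hPre
  unfold Pre_checa_tautograma at hPre
  unfold Spec_checa_tautograma checa_tautograma checa_tautograma_alt
  simp only [splitOn_lower]
  -- the split words, with every word nonempty
  generalize hws : PySem.Chars.splitOn frase.toList [' '] = ws0 at hPre
  have hne : ws0 ≠ [] := by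
    rw [← hws]; unfold PySem.Chars.splitOn; exact splitOn_go_ne_nil _ _ _ _ _
  cases ws0 with
  | nil => exact absurd rfl hne
  | cons w rest =>
    have hw : w ≠ [] := hPre w (List.mem_cons_self)
    cases w with
    | nil => exact absurd rfl hw
    | cons c0 w' =>
      simp only [List.map_cons]
      have hL : PySem.Chars.lower (c0 :: w') = PySem.Chars.lowerChar c0 :: PySem.Chars.lower w' := by
        simp [PySem.Chars.lower]
      simp only [hL]
      simp only [checa_primeira_letra, pyGet?_cons_zero]
      rw [foldl_flag _ (fun s => PySem.List.pyGet? s 0) (some (PySem.Chars.lowerChar c0)) true]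
      rw [PySem.Set.ofList_eq_foldl, List.foldl_cons]
      have hadd0 : PySem.Set.add ([] : PySem.Set (Option Char)) (some (PySem.Chars.lowerChar c0))
          = [some (PySem.Chars.lowerChar c0)] := by
        unfold PySem.Set.add PySem.Set.contains; simp
      rw [hadd0]
      rw [Bool.eq_iff_iff]
      unfold PySem.Set.len
      rw [show ((1 : Int) = ((1 : Nat) : Int)) from rfl]
      simp only [beq_iff_eq, Nat.cast_inj]
      rw [show (1 : Nat) = [some (PySem.Chars.lowerChar c0)].length from rfl, foldl_add_length_eq]
      simp only [List.all_cons, pyGet?_cons_zero, beq_self_eq_true, Bool.true_and,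
        List.all_eq_true, List.mem_map, beq_iff_eq]
      constructor
      · rintro h x ⟨p, ⟨q, hq, rfl⟩, rfl⟩
        have hx := h _ ⟨q, hq, rfl⟩
        simp [PySem.Set.contains, hx]
      · rintro h x ⟨q, hq, rfl⟩
        have hx := h (PySem.List.pyGet? (PySem.Chars.lower q) 0) ⟨_, ⟨q, hq, rfl⟩, rfl⟩
        simpa [PySem.Set.contains] using hx
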